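-- pv_equiv track=rewrite | github.com/IsaacPrice/Machine-Deep-Learning | Chess AI/src/ChessAI.py | dissect_boards
-- ===== SOURCE A (Python) =====
-- def dissect_boards(board_list):
--     # Initialize a list to store the dissected boards
--     X = [] # This will contain a the lists, which each has the last 5 moves
--     y = [] # This will contain the next move
--
--     temp_X = [] # This will contain the last 5 moves
--     temp_y = 0 # This will contain the next move
--
--     # Iterate through the boards
--     for i in range(len(board_list)):
--         temp_X = []
--         temp_y = 0
--
--         # This will loop through the last 5 moves and add them to the list as long as it exists
--         for j in range(5):
--             if i - j >= 0:
--                 temp_X.append(board_list[i - j])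
--             else:
--                 pass # We actually won't add anything to the list, and will be padded later on
--
--         # This will add the next move to the y list
--         if i + 1 < len(board_list):
--             temp_y = board_list[i + 1]
--         else:
--             # This means that the game is over, and we will assingn the last move to the y value
--             temp_y = board_list[i]
--
--             # Add the temp lists to the main lists
--             X.append(temp_X)
--             y.append(temp_y)
--
--             # Return the lists
--             return X, y
--
--         # Add the temp lists to the main lists
--         X.append(temp_X)
--         y.append(temp_y)
-- ===== SOURCE B (Python) =====
-- def dissect_boards(board_list):
--     # Transpose five shifted, padded copies of the list to get the windows;
--     # y is a separate one-line shifted pass.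
--     n = len(board_list)
--     pad = object()
--     shifts = [[pad] * k + board_list[:max(n - k, 0)] for k in range(5)]
--     X = [[b for b in col if b is not pad] for col in zip(*shifts)]
--     y = board_list[1:] + [board_list[-1]]
--     return X, y
-- ===== Notes on version B (the rewrite author's own statement) =====
-- stated objective: alternative
-- what changed: Instead of A's per-index inner loop of 5 guarded lookups, B builds five shifted pad-padded copies of the list and transposes them with zip to get the windows, and computes y as one shifted pass board_list[1:] + [board_list[-1]].
-- outside the precondition, e.g. on dissect_boards([]): A returns None, B raises IndexError
import Mathlib
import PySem

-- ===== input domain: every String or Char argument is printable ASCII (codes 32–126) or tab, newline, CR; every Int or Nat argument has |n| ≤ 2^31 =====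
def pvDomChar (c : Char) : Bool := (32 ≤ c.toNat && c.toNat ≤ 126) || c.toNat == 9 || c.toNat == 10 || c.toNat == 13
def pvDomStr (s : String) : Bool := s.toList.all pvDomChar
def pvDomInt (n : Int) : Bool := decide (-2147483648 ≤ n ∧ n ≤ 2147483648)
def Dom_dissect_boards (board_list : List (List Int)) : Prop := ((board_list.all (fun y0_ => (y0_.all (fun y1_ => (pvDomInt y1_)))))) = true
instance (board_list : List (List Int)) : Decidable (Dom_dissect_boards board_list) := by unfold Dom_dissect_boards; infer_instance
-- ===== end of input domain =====

-- B builds the windows by transposing five shifted, padded copies of the list (a zip),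
-- and y by one shifted pass, instead of A's per-index inner loop; equivalence on
-- nonempty lists (A falls off the end and returns None on []).

-- ===== PORT A =====
-- inner 'for j in range(5)' loop building temp_X
def aTempX (board_list : List (List Int)) (i : Int) : List (List Int) :=
  (PySem.List.pyRange 0 5 1).foldl
    (fun acc j => if i - j ≥ 0 then acc ++ [PySem.List.pyGetD board_list (i - j) []] else acc) []

-- outer 'for i in range(len(board_list))' loop; none = the Python falls off the end (returns None)
def aLoop (board_list : List (List Int)) :
    List Int → List (List (List Int)) × List (List Int) →
    Option (List (List (List Int)) × List (List Int))
  | [], _ => none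
  | i :: rest, (X, y) =>
    let tX := aTempX board_list i
    if i + 1 < (board_list.length : Int) then
      aLoop board_list rest (X ++ [tX], y ++ [PySem.List.pyGetD board_list (i + 1) []])
    else
      some (X ++ [tX], y ++ [PySem.List.pyGetD board_list i []])

def dissect_boards (board_list : List (List Int)) : List (List (List Int)) × List (List Int) :=
  (aLoop board_list (PySem.List.pyRange 0 board_list.length 1) ([], [])).getD ([], [])

-- ===== PORT B =====
-- Python's zip(*shifts) over the five shifted lists
def zip5 {α : Type} : List α → List α → List α → List α → List α → List (α × α × α × α × α)
  | a :: as, b :: bs, c :: cs, d :: ds, e :: es => (a, b, c, d, e) :: zip5 as bs cs ds es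
  | _, _, _, _, _ => []

-- '[pad]*k + board_list[:max(n-k,0)]'; the pad sentinel is 'none', real boards are 'some'
def shiftK (board_list : List (List Int)) (n k : Nat) : List (Option (List Int)) :=
  List.replicate k none ++ (board_list.take (n - k)).map some

def dissect_boards_alt (board_list : List (List Int)) : List (List (List Int)) × List (List Int) :=
  let n := board_list.length
  -- '[b for b in col if b is not pad]' = drop the 'none's, keep the boards
  let X := (zip5 (shiftK board_list n 0) (shiftK board_list n 1) (shiftK board_list n 2)
      (shiftK board_list n 3) (shiftK board_list n 4)).map
    (fun t => List.filterMap id [t.1, t.2.1, t.2.2.1, t.2.2.2.1, t.2.2.2.2])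
  -- y = board_list[1:] + [board_list[-1]]  (Pre_ gives nonemptiness, so [-1] is in range)
  let y := PySem.List.slice board_list (some 1) none ++ [PySem.List.pyGetD board_list (-1) []]
  (X, y)

-- ===== PRECONDITION & SPEC =====
-- Pre_ excludes only the empty list, where A falls off the end and returns None (no value of the declared pair type).
def Pre_dissect_boards (board_list : List (List Int)) : Prop := board_list ≠ []
instance (board_list : List (List Int)) : Decidable (Pre_dissect_boards board_list) := by
  unfold Pre_dissect_boards; infer_instance
def pvWitness_dissect_boards : List (List Int) := [[1, 2], [3], [4, 5]]

def Spec_dissect_boards (board_list : List (List Int)) (out : List (List (List Int)) × List (List Int)) : Prop := out = dissect_boards_alt board_list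
instance (board_list : List (List Int)) (out : List (List (List Int)) × List (List Int)) : Decidable (Spec_dissect_boards board_list out) := by unfold Spec_dissect_boards; infer_instance

-- ===== CLAIM (what is proved, stated in full; the proofs are below) =====
def Claim_equal_dissect_boards : Prop := ∀ (board_list : List (List Int)), Dom_dissect_boards board_list → Pre_dissect_boards board_list → Spec_dissect_boards board_list (dissect_boards board_list)

-- ===== LEMMAS AND PROOFS =====

-- the window at index i: last (up to) 5 boards, newest first
def prefW (board_list : List (List Int)) (k : Nat) : List (List Int) :=
  ((board_list.take k).reverse).take 5

-- the y value recorded at index i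
def yAt (board_list : List (List Int)) (i : Nat) : List Int :=
  if (i : Int) + 1 < (board_list.length : Int) then board_list.getD (i + 1) []
  else board_list.getD i []

theorem prefW_eq_map (bl : List (List Int)) (i : Nat) (hi : i < bl.length) :
    prefW bl (i + 1) = (List.range' 0 (min 5 (i + 1))).map (fun j => bl.getD (i - j) []) := by
  apply List.ext_getElem
  · simp [prefW]; omega
  · intro j h1 h2
    simp only [prefW, List.getElem_take, List.getElem_reverse, List.getElem_map,
      List.getElem_range', List.length_take] at *
    rw [List.getD_eq_getElem?_getD, List.getElem?_eq_getElem (by omega)]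
    simp only [Option.getD_some]
    congr 1
    omega

theorem aTempX_eq (bl : List (List Int)) (i : Nat) (hi : i < bl.length) :
    aTempX bl (i : Int) = prefW bl (i + 1) := by
  rw [prefW_eq_map bl i hi]
  have hpr : PySem.List.pyRange 0 5 1 = [0, 1, 2, 3, 4] := by decide
  unfold aTempX
  rw [hpr]
  simp only [List.foldl]
  rcases Nat.lt_or_ge i 4 with h4 | h4
  · interval_cases i <;>
      simp_all [List.range', PySem.List.pyGetD_ofNat', List.getD_eq_getElem?_getD]
  · have c0 : (i : Int) - 0 >= 0 := by omega
    have c1 : (i : Int) - 1 >= 0 := by omega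
    have c2 : (i : Int) - 2 >= 0 := by omega
    have c3 : (i : Int) - 3 >= 0 := by omega
    have c4 : (i : Int) - 4 >= 0 := by omega
    rw [if_pos c0, if_pos c1, if_pos c2, if_pos c3, if_pos c4]
    have hmin : min 5 (i + 1) = 5 := by omega
    rw [hmin]
    have g : forall (k : Nat), k <= 4 -> PySem.List.pyGetD bl ((i : Int) - (k : Int)) [] = bl.getD (i - k) [] := by
      intro k hk
      rw [show (i : Int) - (k : Int) = ((i - k : Nat) : Int) by omega, PySem.List.pyGetD_natCast]
    have g0 := g 0 (by omega)
    have g1 := g 1 (by omega)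
    have g2 := g 2 (by omega)
    have g3 := g 3 (by omega)
    have g4 := g 4 (by omega)
    push_cast at g0 g1 g2 g3 g4
    simp only [List.range', List.map]
    simp [g1, g2, g3, g4]

theorem yAt_last (bl : List (List Int)) (i : Nat) (h : ¬ ((i : Int) + 1 < (bl.length : Int))) :
    yAt bl i = bl.getD i [] := by
  unfold yAt; rw [if_neg h]

-- A's outer loop produces the maps of prefW/yAt over the remaining indices
theorem aLoop_eq (bl : List (List Int)) :
    ∀ (k : Nat) (X : List (List (List Int))) (y : List (List Int)), k < bl.length →
      aLoop bl (PySem.List.pyRange (k : Int) (bl.length : Int) 1) (X, y) =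
        some (X ++ (List.range' k (bl.length - k)).map (fun i => prefW bl (i + 1)),
              y ++ (List.range' k (bl.length - k)).map (yAt bl)) := by
  intro k
  induction hm : bl.length - k generalizing k with
  | zero => intro X y hk; omega
  | succ m ih =>
    intro X y hk
    rw [PySem.List.pyRange_one_cons (by exact_mod_cast hk)]
    show aLoop bl ((k : Int) :: _) (X, y) = _
    unfold aLoop
    simp only
    rw [aTempX_eq bl k hk]
    by_cases h : (k : Int) + 1 < (bl.length : Int)
    · rw [if_pos h]
      have hk1 : k + 1 < bl.length := by exact_mod_cast (by omega : (k : Int) + 1 < (bl.length : Int))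
      have hcast : (k : Int) + 1 = ((k + 1 : Nat) : Int) := by push_cast; ring
      rw [hcast, ih (k + 1) (by omega) _ _ hk1]
      rw [List.range'_succ]
      have hym : PySem.List.pyGetD bl ((k + 1 : Nat) : Int) [] = yAt bl k := by
        unfold yAt; rw [if_pos h, PySem.List.pyGetD_natCast]
      rw [hym]
      simp [List.append_assoc]
    · rw [if_neg h]
      have hm0 : m = 0 := by
        have : ¬ (k + 1 < bl.length) := fun hc => h (by exact_mod_cast hc)
        omega
      subst hm0
      have hy : PySem.List.pyGetD bl (k : Int) [] = yAt bl k := by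
        rw [yAt_last bl k h, PySem.List.pyGetD_natCast]
      simp [List.range', hy]

-- ----- B-side lemmas -----

theorem zip5_length {α : Type} : ∀ (l0 l1 l2 l3 l4 : List α),
    (zip5 l0 l1 l2 l3 l4).length =
      min l0.length (min l1.length (min l2.length (min l3.length l4.length))) := by
  intro l0
  induction l0 with
  | nil => intro l1 l2 l3 l4; cases l1 <;> cases l2 <;> cases l3 <;> cases l4 <;> simp [zip5]
  | cons a as ih =>
    intro l1 l2 l3 l4
    cases l1 <;> cases l2 <;> cases l3 <;> cases l4 <;> simp [zip5, ih]

theorem zip5_getElem? {α : Type} (d : α) : ∀ (l0 l1 l2 l3 l4 : List α) (i : Nat),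
    i < l0.length → i < l1.length → i < l2.length → i < l3.length → i < l4.length →
    (zip5 l0 l1 l2 l3 l4)[i]? =
      some (l0.getD i d, l1.getD i d, l2.getD i d, l3.getD i d, l4.getD i d) := by
  intro l0
  induction l0 with
  | nil => intro l1 l2 l3 l4 i h0; simp at h0
  | cons a as ih =>
    intro l1 l2 l3 l4 i h0 h1 h2 h3 h4
    cases l1 with
    | nil => simp at h1
    | cons b bs =>
      cases l2 with
      | nil => simp at h2
      | cons c cs =>
        cases l3 with
        | nil => simp at h3
        | cons e es =>
          cases l4 with
          | nil => simp at h4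
          | cons f fs =>
            cases i with
            | zero => simp [zip5]
            | succ j =>
              simp only [zip5, List.getElem?_cons_succ, List.getD_cons_succ]
              exact ih bs cs es fs j (by simpa using h0) (by simpa using h1)
                (by simpa using h2) (by simpa using h3) (by simpa using h4)

theorem shiftK_length (bl : List (List Int)) (k : Nat) :
    (shiftK bl bl.length k).length = k + (bl.length - k) := by
  simp [shiftK]

theorem shiftK_getD (bl : List (List Int)) (k i : Nat) (hi : i < bl.length) :
    (shiftK bl bl.length k).getD i none =
      if i < k then none else some (bl.getD (i - k) []) := by
  unfold shiftK
  by_cases h : i < k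
  · rw [if_pos h]
    rw [List.getD_eq_getElem?_getD, List.getElem?_append_left (by simpa using h)]
    simp [h]
  · rw [if_neg h]
    have hk : k ≤ i := Nat.le_of_not_lt h
    rw [List.getD_eq_getElem?_getD, List.getElem?_append_right (by simpa using hk)]
    simp only [List.length_replicate, List.getElem?_map, List.getElem?_take]
    have hlt : i - k < bl.length - k := by omega
    rw [if_pos hlt, List.getElem?_eq_getElem (by omega)]
    simp [List.getD_eq_getElem?_getD, List.getElem?_eq_getElem (by omega : i - k < bl.length)]

-- the tuple-to-window comprehension agrees with prefW's closed form
theorem windows_eq (bl : List (List Int)) (i : Nat) :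
    List.filterMap id [some (bl.getD i []),
      (if i < 1 then none else some (bl.getD (i - 1) [])),
      (if i < 2 then none else some (bl.getD (i - 2) [])),
      (if i < 3 then none else some (bl.getD (i - 3) [])),
      (if i < 4 then none else some (bl.getD (i - 4) []))] =
    (List.range' 0 (min 5 (i + 1))).map (fun j => bl.getD (i - j) []) := by
  rcases Nat.lt_or_ge i 4 with h | h
  · interval_cases i <;> simp [List.range', List.filterMap]
  · have h1 : ¬ i < 1 := by omega
    have h2 : ¬ i < 2 := by omega
    have h3 : ¬ i < 3 := by omega
    have h4 : ¬ i < 4 := by omega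
    have h5 : min 5 (i + 1) = 5 := by omega
    simp [h1, h2, h3, h4, h5, List.range', List.filterMap]

theorem bX_eq (bl : List (List Int)) :
    (zip5 (shiftK bl bl.length 0) (shiftK bl bl.length 1) (shiftK bl bl.length 2)
        (shiftK bl bl.length 3) (shiftK bl bl.length 4)).map
      (fun t => List.filterMap id [t.1, t.2.1, t.2.2.1, t.2.2.2.1, t.2.2.2.2]) =
    (List.range' 0 bl.length).map (fun i => prefW bl (i + 1)) := by
  have hzlen : (zip5 (shiftK bl bl.length 0) (shiftK bl bl.length 1) (shiftK bl bl.length 2)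
      (shiftK bl bl.length 3) (shiftK bl bl.length 4)).length = bl.length := by
    rw [zip5_length]
    simp only [shiftK_length]
    omega
  apply List.ext_getElem?
  intro i
  by_cases hi : i < bl.length
  · rw [List.getElem?_map, List.getElem?_map,
      zip5_getElem? none _ _ _ _ _ i (by rw [shiftK_length]; omega) (by rw [shiftK_length]; omega)
        (by rw [shiftK_length]; omega) (by rw [shiftK_length]; omega) (by rw [shiftK_length]; omega),
      List.getElem?_range' (by omega)]
    simp only [Option.map_some, one_mul]
    rw [shiftK_getD bl 0 i hi, shiftK_getD bl 1 i hi, shiftK_getD bl 2 i hi,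
      shiftK_getD bl 3 i hi, shiftK_getD bl 4 i hi]
    simp only [Nat.not_lt_zero, if_false, Nat.sub_zero, Nat.zero_add]
    rw [windows_eq bl i, prefW_eq_map bl i hi]
  · rw [List.getElem?_eq_none (by simpa [hzlen] using Nat.le_of_not_lt hi),
      List.getElem?_eq_none (by simpa using Nat.le_of_not_lt hi)]

theorem bY_eq (bl : List (List Int)) (h : bl ≠ []) :
    PySem.List.slice bl (some 1) none ++ [PySem.List.pyGetD bl (-1) []] =
      (List.range' 0 bl.length).map (yAt bl) := by
  have hn : 0 < bl.length := List.length_pos_iff.mpr h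
  rw [PySem.List.slice_from_one, PySem.List.pyGetD_neg_one bl [] h]
  apply List.ext_getElem
  · simp; omega
  · intro i h1 h2
    simp only [List.length_map, List.length_range'] at h2
    rw [List.getElem_map, List.getElem_range']
    simp only [Nat.zero_add, one_mul]
    unfold yAt
    by_cases hlast : (i : Int) + 1 < (bl.length : Int)
    · rw [if_pos hlast]
      have hi1 : i + 1 < bl.length := by exact_mod_cast hlast
      rw [List.getElem_append_left (by simp [List.length_tail]; omega)]
      rw [List.getD_eq_getElem?_getD, List.getElem?_eq_getElem hi1]
      simp [List.getElem_tail]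
    · rw [if_neg hlast]
      have hi : i = bl.length - 1 := by omega
      rw [List.getElem_append_right (by simp [List.length_tail]; omega)]
      have hz : i - bl.tail.length = 0 := by simp [List.length_tail]; omega
      simp only [hz, List.getElem_cons_zero]
      rw [List.getLast_eq_getElem]
      rw [List.getD_eq_getElem?_getD, List.getElem?_eq_getElem (by omega : i < bl.length)]
      simp only [Option.getD_some]
      congr 1
      omega

theorem alt_eq (bl : List (List Int)) (h : bl ≠ []) :
    dissect_boards_alt bl =
      ((List.range' 0 bl.length).map (fun i => prefW bl (i + 1)),
       (List.range' 0 bl.length).map (yAt bl)) := by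
  unfold dissect_boards_alt
  simp only []
  rw [bX_eq bl, bY_eq bl h]

-- ===== VERDICT (by name: the statement is the Claim_ definition above) =====
theorem dissect_boards_spec : Claim_equal_dissect_boards := by
  intro bl _hdom hpre
  unfold Spec_dissect_boards
  have hn : 0 < bl.length := List.length_pos_iff.mpr hpre
  have hA := aLoop_eq bl 0 [] [] hn
  simp only [Nat.cast_zero] at hA
  unfold dissect_boards
  rw [hA, alt_eq bl hpre]
  simp
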